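-- pv_equiv track=rewrite | github.com/Jeanvr/supplier-scrapi | src/providers/calpeda/resolver.py | _has_extended_family_variant
-- ===== SOURCE A (Python) =====
-- def _has_extended_family_variant(query_tokens: set[str], matched_tokens: set[str]) -> bool:
--     for query_token in query_tokens:
--         if len(query_token) < 4 or not query_token.isalpha():
--             continue
--         for matched_token in matched_tokens:
--             if len(matched_token) < 3 or len(matched_token) >= len(query_token):
--                 continue
--             if not matched_token.isalpha():
--                 continue
--             if query_token.startswith(matched_token) and len(query_token) - len(matched_token) <= 2:
--                 return True
--     return False
-- ===== SOURCE B (Python) =====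
-- def _has_extended_family_variant(query_tokens: set[str], matched_tokens: set[str]) -> bool:
--     matched = set(matched_tokens)
--     for query_token in query_tokens:
--         n = len(query_token)
--         if n >= 4 and query_token.isalpha():
--             # A match must be an alpha prefix of length n-1 or n-2 that is >= 3 long;
--             # prefixes of an alphabetic token are alphabetic, so membership suffices.
--             if query_token[:n - 1] in matched or (n >= 5 and query_token[:n - 2] in matched):
--                 return True
--     return False
-- ===== Notes on version B (the rewrite author's own statement) =====
-- stated objective: alternative
-- what changed: Replaces the nested scan over matched_tokens per query token by a set built once, checking only the two candidate prefixes (lengths n-1 and n-2) of each qualifying query token.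
import Mathlib
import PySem

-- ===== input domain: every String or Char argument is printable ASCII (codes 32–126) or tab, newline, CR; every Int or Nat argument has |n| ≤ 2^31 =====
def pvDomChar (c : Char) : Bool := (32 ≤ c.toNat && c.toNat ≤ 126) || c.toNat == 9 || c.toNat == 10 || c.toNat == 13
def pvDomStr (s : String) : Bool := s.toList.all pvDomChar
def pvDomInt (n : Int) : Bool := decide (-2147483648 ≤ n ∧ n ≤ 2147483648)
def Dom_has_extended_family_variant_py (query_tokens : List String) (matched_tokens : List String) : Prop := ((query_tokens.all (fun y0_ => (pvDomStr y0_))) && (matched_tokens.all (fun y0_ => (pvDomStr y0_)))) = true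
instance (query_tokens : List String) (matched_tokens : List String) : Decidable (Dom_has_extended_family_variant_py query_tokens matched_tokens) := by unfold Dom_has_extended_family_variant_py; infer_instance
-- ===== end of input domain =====

-- B replaces A's nested scan over matched_tokens with a set built once and two prefix lookups per query token (alternative algorithm).


-- ===== PORT A =====
-- inner 'for matched_token in matched_tokens' loop with its early return
def pvInnerA (query_token : String) : List String → Bool
  | [] => false
  | matched_token :: rest =>
      if PySem.Str.len matched_token < 3 || PySem.Str.len query_token ≤ PySem.Str.len matched_token then
        pvInnerA query_token rest
      else if !PySem.Str.strIsalpha matched_token then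
        pvInnerA query_token rest
      else if PySem.Str.startswith query_token matched_token
              && decide (PySem.Str.len query_token - PySem.Str.len matched_token ≤ 2) then
        true
      else
        pvInnerA query_token rest

def has_extended_family_variant_py (query_tokens : List String) (matched_tokens : List String) : Bool :=
  match query_tokens with
  | [] => false
  | query_token :: rest =>
      if PySem.Str.len query_token < 4 || !PySem.Str.strIsalpha query_token then
        has_extended_family_variant_py rest matched_tokens
      else if pvInnerA query_token matched_tokens then
        true
      else
        has_extended_family_variant_py rest matched_tokens

-- ===== PORT B =====
def has_extended_family_variant_py_alt (query_tokens : List String) (matched_tokens : List String) : Bool :=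
  let matched := PySem.Set.ofList matched_tokens
  query_tokens.any fun query_token =>
    let n := PySem.Str.len query_token
    decide (4 ≤ n) && PySem.Str.strIsalpha query_token
      && (PySem.Set.contains matched (PySem.Str.slice query_token none (some (n - 1)))
          || (decide (5 ≤ n) && PySem.Set.contains matched (PySem.Str.slice query_token none (some (n - 2)))))

-- ===== PRECONDITION & SPEC =====
def Spec_has_extended_family_variant_py (query_tokens : List String) (matched_tokens : List String) (out : Bool) : Prop := out = has_extended_family_variant_py_alt query_tokens matched_tokens
instance (query_tokens : List String) (matched_tokens : List String) (out : Bool) : Decidable (Spec_has_extended_family_variant_py query_tokens matched_tokens out) := by unfold Spec_has_extended_family_variant_py; infer_instance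

-- ===== CLAIM (what is proved, stated in full; the proofs are below) =====
def Claim_equal_has_extended_family_variant_py : Prop := ∀ (query_tokens : List String) (matched_tokens : List String), Dom_has_extended_family_variant_py query_tokens matched_tokens → Spec_has_extended_family_variant_py query_tokens matched_tokens (has_extended_family_variant_py query_tokens matched_tokens)

-- ===== LEMMAS AND PROOFS =====

-- A's inner-loop body as one boolean condition on a single matched token (same branch structure)
def pvCondA (q m : String) : Bool :=
  if PySem.Str.len m < 3 || PySem.Str.len q ≤ PySem.Str.len m then false
  else if !PySem.Str.strIsalpha m then false
  else if PySem.Str.startswith q m && decide (PySem.Str.len q - PySem.Str.len m ≤ 2) then true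
  else false

lemma pvInnerA_eq_any (q : String) (ms : List String) : pvInnerA q ms = ms.any (pvCondA q) := by
  induction ms with
  | nil => rfl
  | cons m rest ih =>
      rw [List.any_cons, ← ih]
      show (if _ then pvInnerA q rest else if _ then pvInnerA q rest else if _ then true else pvInnerA q rest) = _
      rw [pvCondA]
      split_ifs <;> simp

-- the slice q[:len(q)-j] is the take of the char list
lemma pvSlice_toList (q : String) (j : Nat) (hj : j ≤ q.length) :
    (PySem.Str.slice q none (some (PySem.Str.len q - (j : Int)))).toList = q.toList.take (q.length - j) := by
  rw [PySem.Str.toList_slice, PySem.Chars.slice_eq_listSlice]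
  rw [show PySem.Str.len q - (j : Int) = ((q.length - j : Nat) : Int) by
        simp [PySem.Str.len]; omega]
  exact PySem.List.slice_to_natCast q.toList (q.length - j)

lemma pvCondA_iff (q m : String) (hq4 : 4 ≤ q.length) (hqa : PySem.Str.strIsalpha q = true) :
    pvCondA q m = true ↔
      (m.toList = q.toList.take (q.length - 1) ∨
       (5 ≤ q.length ∧ m.toList = q.toList.take (q.length - 2))) := by
  have hL : q.toList.length = q.length := by simp
  have hmL : m.toList.length = m.length := by simp
  have hlen1 : ∀ j : Nat, m.toList = q.toList.take (q.length - j) → m.length = min (q.length - j) q.length := by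
    intro j hm
    have := congrArg List.length hm
    simpa [hL, hmL] using this
  have halpha : ∀ cs : List Char, cs ≠ [] → cs <+: q.toList → PySem.Chars.strIsalpha cs = true := by
    intro cs hne hpre
    have hq' : PySem.Chars.strIsalpha q.toList = true := by
      simpa [PySem.Str.strIsalpha_eq] using hqa
    simp only [PySem.Chars.strIsalpha, Bool.and_eq_true, List.all_eq_true] at hq' ⊢
    exact ⟨by simpa [List.isEmpty_iff] using hne,
      fun c hc => hq'.2 c (hpre.subset hc)⟩
  rw [pvCondA]
  split_ifs with h1 h2 h3
  · -- skipped: len m < 3 or len m >= len q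
    simp only [PySem.Str.len, String.length_toList, decide_eq_true_eq, Bool.or_eq_true_iff] at h1
    constructor
    · intro h; exact absurd h (by simp)
    · rintro (hm | ⟨h5, hm⟩)
      · have := hlen1 1 hm; omega
      · have := hlen1 2 hm; omega
  · -- skipped: not alpha
    simp only [Bool.not_eq_eq_eq_not, Bool.not_true] at h2
    constructor
    · intro h; exact absurd h (by simp)
    · have key : ∀ j : Nat, 1 ≤ j → j < q.length → m.toList = q.toList.take (q.length - j) → False := by
        intro j hj1 hjq hm
        have hne : m.toList ≠ [] := by
          intro h0
          have := hlen1 j hm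
          rw [h0] at hmL
          simp at hmL
          omega
        have hAl := halpha m.toList hne (by rw [hm]; exact List.take_prefix _ _)
        simp [PySem.Str.strIsalpha_eq, hAl] at h2
      rintro (hm | ⟨h5, hm⟩)
      · exact absurd (key 1 (by omega) (by omega) hm) not_false
      · exact absurd (key 2 (by omega) (by omega) hm) not_false
  · -- hit: startswith holds and the length difference is ≤ 2
    simp only [PySem.Str.len, String.length_toList, decide_eq_true_eq, Bool.or_eq_true_iff] at h1
    push_neg at h1
    obtain ⟨h3', hlt⟩ := h1
    simp only [Bool.and_eq_true, decide_eq_true_eq, PySem.Str.len, String.length_toList,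
      PySem.Str.startswith_eq] at h3
    obtain ⟨hpre, hdiff⟩ := h3
    have hpre' : m.toList <+: q.toList := (PySem.Chars.startswith_iff _ _).mp hpre
    have htake := List.prefix_iff_eq_take.mp hpre'
    rw [hmL] at htake
    constructor
    · intro _
      have hk : m.length = q.length - 1 ∨ m.length = q.length - 2 := by omega
      rcases hk with hk | hk
      · left; rw [htake, hk]
      · right; exact ⟨by omega, by rw [htake, hk]⟩
    · intro _; rfl
  · -- miss: startswith fails or the length difference is > 2 — but a take of length n-1 or n-2 always hits
    simp only [PySem.Str.len, String.length_toList, decide_eq_true_eq, Bool.or_eq_true_iff] at h1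
    push_neg at h1
    obtain ⟨h3', hlt⟩ := h1
    constructor
    · intro h; exact absurd h (by simp)
    · have key : ∀ j : Nat, 1 ≤ j → j ≤ 2 → j < q.length → m.toList = q.toList.take (q.length - j) → False := by
        intro j hj1 hj2 hjq hm
        apply h3
        have hpre : m.toList <+: q.toList := by
          rw [hm]; exact List.take_prefix _ _
        have hk := hlen1 j hm
        simp only [Bool.and_eq_true, decide_eq_true_eq, PySem.Str.len, String.length_toList,
          PySem.Str.startswith_eq]
        refine ⟨(PySem.Chars.startswith_iff _ _).mpr hpre, ?_⟩
        omega
      rintro (hm | ⟨h5, hm⟩)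
      · exact absurd (key 1 (by omega) (by omega) (by omega) hm) not_false
      · exact absurd (key 2 (by omega) (by omega) (by omega) hm) not_false

lemma pvContains_ofList (m : String) (ms : List String) :
    PySem.Set.contains (PySem.Set.ofList ms) m = true ↔ m ∈ ms := by
  simp only [PySem.Set.contains, List.contains_iff_mem]
  exact PySem.Set.mem_ofList ms m

lemma pvStep_eq (q : String) (ms : List String) :
    (if PySem.Str.len q < 4 || !PySem.Str.strIsalpha q then false else pvInnerA q ms)
    = (decide (4 ≤ PySem.Str.len q) && PySem.Str.strIsalpha q
        && (PySem.Set.contains (PySem.Set.ofList ms) (PySem.Str.slice q none (some (PySem.Str.len q - 1)))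
            || (decide (5 ≤ PySem.Str.len q) && PySem.Set.contains (PySem.Set.ofList ms) (PySem.Str.slice q none (some (PySem.Str.len q - 2)))))) := by
  rw [pvInnerA_eq_any, Bool.eq_iff_iff]
  by_cases h4 : 4 ≤ q.length
  · by_cases ha : PySem.Str.strIsalpha q = true
    · have h4' : (4:Int) ≤ PySem.Str.len q := by
        simp only [PySem.Str.len, String.length_toList]
        exact_mod_cast h4
      have haC : PySem.Chars.strIsalpha q.toList = true := by
        simpa [PySem.Str.strIsalpha_eq] using ha
      rw [if_neg (by simp [haC, h4])]
      have e1 : (PySem.Str.slice q none (some (PySem.Str.len q - 1))).toList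
          = q.toList.take (q.length - 1) := by
        simpa using pvSlice_toList q 1 (by omega)
      have e2 : (PySem.Str.slice q none (some (PySem.Str.len q - 2))).toList
          = q.toList.take (q.length - 2) := by
        simpa using pvSlice_toList q 2 (by omega)
      have hslice1 : ∀ m : String, m = PySem.Str.slice q none (some (PySem.Str.len q - 1)) ↔
          m.toList = q.toList.take (q.length - 1) := by
        intro m
        rw [← String.toList_inj, e1]
      have hslice2 : ∀ m : String, m = PySem.Str.slice q none (some (PySem.Str.len q - 2)) ↔
          m.toList = q.toList.take (q.length - 2) := by
        intro m
        rw [← String.toList_inj, e2]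
      simp only [List.any_eq_true, Bool.and_eq_true, Bool.or_eq_true_iff, decide_eq_true_eq,
        PySem.Str.len, String.length_toList, pvContains_ofList]
      constructor
      · rintro ⟨m, hmem, hcond⟩
        refine ⟨⟨by exact_mod_cast h4, ha⟩, ?_⟩
        rcases (pvCondA_iff q m h4 ha).mp hcond with hm | ⟨h5, hm⟩
        · exact Or.inl (((hslice1 m).mpr hm) ▸ hmem)
        · exact Or.inr ⟨by exact_mod_cast h5, ((hslice2 m).mpr hm) ▸ hmem⟩
      · rintro ⟨-, hm | ⟨h5, hm⟩⟩
        · exact ⟨_, hm, (pvCondA_iff q _ h4 ha).mpr (Or.inl ((hslice1 _).mp rfl))⟩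
        · exact ⟨_, hm, (pvCondA_iff q _ h4 ha).mpr
            (Or.inr ⟨by exact_mod_cast h5, (hslice2 _).mp rfl⟩)⟩
    · have ha' : PySem.Str.strIsalpha q = false := by
        cases hb : PySem.Str.strIsalpha q
        · rfl
        · exact absurd hb ha
      rw [if_pos (by rw [ha']; simp)]
      constructor
      · intro h; exact absurd h (by simp)
      · intro h
        simp only [Bool.and_eq_true] at h
        rw [ha'] at h
        exact absurd h.1.2 (by simp)
  · have hlt : PySem.Str.len q < 4 := by
      simp only [PySem.Str.len, String.length_toList]
      exact_mod_cast (by omega : q.length < 4)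
    rw [if_pos (by
      have hn : q.length < 4 := by omega
      simp [hn])]
    constructor
    · intro h; exact absurd h (by simp)
    · intro h
      simp only [Bool.and_eq_true, decide_eq_true_eq, PySem.Str.len,
        String.length_toList] at h
      exact absurd h.1.1 (by push_cast; omega)

lemma pvMain (query_tokens matched_tokens : List String) :
    has_extended_family_variant_py query_tokens matched_tokens
      = has_extended_family_variant_py_alt query_tokens matched_tokens := by
  induction query_tokens with
  | nil => rfl
  | cons q rest ih =>
      have halt : has_extended_family_variant_py_alt (q :: rest) matched_tokens
          = ((decide (4 ≤ PySem.Str.len q) && PySem.Str.strIsalpha q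
              && (PySem.Set.contains (PySem.Set.ofList matched_tokens)
                    (PySem.Str.slice q none (some (PySem.Str.len q - 1)))
                  || (decide (5 ≤ PySem.Str.len q)
                      && PySem.Set.contains (PySem.Set.ofList matched_tokens)
                           (PySem.Str.slice q none (some (PySem.Str.len q - 2))))))
             || has_extended_family_variant_py_alt rest matched_tokens) := rfl
      show (if _ then has_extended_family_variant_py rest matched_tokens
            else if pvInnerA q matched_tokens then true
            else has_extended_family_variant_py rest matched_tokens)
          = _
      rw [halt, ← pvStep_eq q matched_tokens, ih]
      split_ifs with h1 h2 <;> simp_all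

-- ===== VERDICT (by name: the statement is the Claim_ definition above) =====
theorem has_extended_family_variant_py_spec : Claim_equal_has_extended_family_variant_py := by
  intro query_tokens matched_tokens _
  unfold Spec_has_extended_family_variant_py
  exact pvMain query_tokens matched_tokens
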